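-- pv_equiv track=rewrite | github.com/Rubindai/USYD | Year1/sem1/INFO1112/A2_NXDOMAIN/verifier.py | is_valid_hostname_master
-- ===== SOURCE A (Python) =====
-- def valid_section_a_b(section_a):
--     valid_char1 = (
--         'abcdefghijklmnopqrstuvwxyzABCDEFGHIJKLMNOPQRSTUVWXYZ0123456789-')
--     for i in section_a:
--
--         if i not in valid_char1:
--             return False
--     return True
--
-- def valid_section_c(section_c):
--     if section_c[0] == '.' or section_c[-1] == '.':
--         return False
--     valid_char2 = (
--         'abcdefghijklmnopqrstuvwxyzABCDEFGHIJKLMNOPQRSTUVWXYZ0123456789-.')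
--     for i in section_c:
--
--         if i not in valid_char2:
--             return False
--     return True
--
-- def is_valid_hostname_master(host):
--     host = host.split('.')
--     if len(host) >= 3:
--
--         section_a = host[-1]
--         section_b = host[-2]
--         section_c_list = host[:-2]
--         section_c = ''
--         for i in section_c_list:
--             section_c += i+'.'
--         section_c = section_c[:-1]
--         if section_a == '' or section_b == '' or section_c == '':
--             return False
--
--         value_a = valid_section_a_b(section_a)
--         value_b = valid_section_a_b(section_b)
--         value_c = valid_section_c(section_c)
--         value = value_a and value_b and value_c
--         return value
--     else:
--         return False
-- ===== SOURCE B (Python) =====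
-- # B: single pass over the raw string using dot positions -- no split, no list
-- # rebuild: validity is read off the last three dot positions and one charset scan.
-- _ALLOWED = set('abcdefghijklmnopqrstuvwxyz'
--                'ABCDEFGHIJKLMNOPQRSTUVWXYZ0123456789-.')
--
-- def is_valid_hostname_master(host):
--     if not all(ch in _ALLOWED for ch in host):
--         return False
--     dots = [i for i, ch in enumerate(host) if ch == '.']
--     if len(dots) < 2:
--         return False
--     d1, d2 = dots[-2], dots[-1]
--     d0 = dots[-3] if len(dots) >= 3 else -1
--     return (host[0] != '.' and d2 != len(host) - 1
--             and d2 - d1 > 1 and d1 - d0 > 1)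
-- ===== Notes on version B (the rewrite author's own statement) =====
-- stated objective: alternative
-- what changed: Instead of splitting the host into labels, rebuilding the prefix with a join loop and validating three sections with helper scans, B does one charset scan of the raw string and decides validity purely from the positions of the last three dots (gaps between them encode the non-emptiness of the relevant labels).
import Mathlib
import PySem

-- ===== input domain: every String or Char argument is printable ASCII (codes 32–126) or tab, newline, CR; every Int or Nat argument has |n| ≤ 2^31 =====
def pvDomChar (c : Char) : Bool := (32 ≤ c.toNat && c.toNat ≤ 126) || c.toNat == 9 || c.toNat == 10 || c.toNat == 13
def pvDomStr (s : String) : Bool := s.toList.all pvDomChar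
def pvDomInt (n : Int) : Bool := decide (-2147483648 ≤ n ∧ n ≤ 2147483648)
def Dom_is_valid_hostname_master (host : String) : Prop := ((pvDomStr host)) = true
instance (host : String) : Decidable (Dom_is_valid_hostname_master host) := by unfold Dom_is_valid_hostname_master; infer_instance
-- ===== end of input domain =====

-- B replaces A's split/rebuild/three-section validation by one charset scan plus
-- arithmetic on the positions of the last three dots (alternative, same cost).

-- ===== PORT A =====
def pvValid1 : List Char :=
  "abcdefghijklmnopqrstuvwxyzABCDEFGHIJKLMNOPQRSTUVWXYZ0123456789-".toList

def pvValid2 : List Char :=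
  "abcdefghijklmnopqrstuvwxyzABCDEFGHIJKLMNOPQRSTUVWXYZ0123456789-.".toList

-- valid_section_a_b: the character loop with its early `return False`
def pvValidSectionAB : List Char → Bool
  | [] => true
  | i :: rest => if pvValid1.contains i then pvValidSectionAB rest else false

-- the character loop of valid_section_c
def pvValidCLoop : List Char → Bool
  | [] => true
  | i :: rest => if pvValid2.contains i then pvValidCLoop rest else false

-- valid_section_c; Python indexes section_c[0] and section_c[-1] (pyGet?);
-- A only calls it with nonempty section_c, so the `none` branch (IndexError) is unreachable
def pvValidSectionC (s : List Char) : Bool :=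
  match PySem.List.pyGet? s 0, PySem.List.pyGet? s (-1) with
  | some c0, some c1 => if c0 = '.' ∨ c1 = '.' then false else pvValidCLoop s
  | _, _ => false

def is_valid_hostname_master (host : String) : Bool :=
  let parts := PySem.Chars.splitOn host.toList ['.']
  if 3 ≤ parts.length then
    -- host[-1], host[-2] always exist here (length ≥ 3): the getD default is never taken
    let section_a := (PySem.List.pyGet? parts (-1)).getD []
    let section_b := (PySem.List.pyGet? parts (-2)).getD []
    let section_c_list := PySem.List.slice parts none (some (-2))
    let built := section_c_list.foldl (fun acc i => acc ++ i ++ ['.']) []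
    let section_c := PySem.List.slice built none (some (-1))
    if section_a = [] ∨ section_b = [] ∨ section_c = [] then false
    else
      let value_a := pvValidSectionAB section_a
      let value_b := pvValidSectionAB section_b
      let value_c := pvValidSectionC section_c
      value_a && value_b && value_c
  else false

-- ===== PORT B =====
def pvAllowed : List Char :=
  "abcdefghijklmnopqrstuvwxyzABCDEFGHIJKLMNOPQRSTUVWXYZ0123456789-.".toList

def is_valid_hostname_master_alt (host : String) : Bool :=
  let cs := host.toList
  if cs.all (fun ch => pvAllowed.contains ch) then
    let dots := (PySem.List.enumerate cs 0).filterMap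
        (fun p => if p.2 = '.' then some p.1 else none)
    if dots.length < 2 then false
    else
      -- dots[-2], dots[-1] exist (length ≥ 2); host[0] exists (host has a dot)
      let d1 := (PySem.List.pyGet? dots (-2)).getD 0
      let d2 := (PySem.List.pyGet? dots (-1)).getD 0
      let d0 := if 3 ≤ dots.length then (PySem.List.pyGet? dots (-3)).getD 0 else -1
      decide (PySem.List.pyGet? cs 0 ≠ some '.') &&
        decide (d2 ≠ (cs.length : Int) - 1) &&
        decide (1 < d2 - d1) && decide (1 < d1 - d0)
  else false

-- ===== PRECONDITION & SPEC =====
def Spec_is_valid_hostname_master (host : String) (out : Bool) : Prop := out = is_valid_hostname_master_alt host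
instance (host : String) (out : Bool) : Decidable (Spec_is_valid_hostname_master host out) := by unfold Spec_is_valid_hostname_master; infer_instance

-- ===== CLAIM (what is proved, stated in full; the proofs are below) =====
def Claim_equal_is_valid_hostname_master : Prop := ∀ (host : String), Dom_is_valid_hostname_master host → Spec_is_valid_hostname_master host (is_valid_hostname_master host)

-- ===== LEMMAS AND PROOFS =====

-- reference single-character split (split on '.', accumulating the current piece)
def pvSplit (pre : List Char) : List Char → List (List Char)
  | [] => [pre]
  | c :: rest => if c = '.' then pre :: pvSplit [] rest else pvSplit (pre ++ [c]) rest

-- dot positions, as B's comprehension computes them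
def pvDots (l : List Char) (s : Int) : List Int :=
  (PySem.List.enumerate l s).filterMap (fun p => if p.2 = '.' then some p.1 else none)

theorem pvSplit_go (fuel : Nat) : ∀ (l cur : List Char) (acc : List (List Char)),
    l.length < fuel →
    PySem.Chars.splitOn.go ['.'] fuel l cur acc = acc.reverse ++ pvSplit cur.reverse l := by
  induction fuel with
  | zero => intro l cur acc h; omega
  | succ n ih =>
    intro l cur acc h
    match l with
    | [] => simp [PySem.Chars.splitOn.go, pvSplit]
    | c :: rest =>
      by_cases hc : c = '.'
      · subst hc
        have hpre : List.isPrefixOf ['.'] ('.' :: rest) = true := by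
          simp [List.isPrefixOf]
        have hdrop : List.drop (['.'] : List Char).length ('.' :: rest) = rest := by simp
        simp only [PySem.Chars.splitOn.go, hpre, if_true, hdrop]
        rw [ih rest [] (cur.reverse :: acc) (by simp at h; omega)]
        simp [pvSplit]
      · have hpre : List.isPrefixOf ['.'] (c :: rest) = false := by
          simp only [List.isPrefixOf, Bool.and_eq_false_iff, beq_eq_false_iff_ne]
          exact Or.inl fun hh => hc hh.symm
        simp only [PySem.Chars.splitOn.go, hpre]
        rw [if_neg (by simp), ih rest (c :: cur) acc (by simp at h; omega)]
        simp [pvSplit, hc]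

theorem pvSplitOn_eq (cs : List Char) : PySem.Chars.splitOn cs ['.'] = pvSplit [] cs := by
  unfold PySem.Chars.splitOn
  rw [pvSplit_go _ _ _ _ (by omega)]
  rfl

theorem pvSplit_length (pre l) : (pvSplit pre l).length = l.count '.' + 1 := by
  induction l generalizing pre with
  | nil => simp [pvSplit]
  | cons c rest ih =>
    by_cases hc : c = '.' <;> simp [pvSplit, hc, ih]

theorem pvSplit_no_dot (pre l) (h : '.' ∉ l) : pvSplit pre l = [pre ++ l] := by
  induction l generalizing pre with
  | nil => simp [pvSplit]
  | cons c rest ih =>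
    simp only [List.mem_cons, not_or] at h
    have hc : ¬ c = '.' := fun hh => h.1 hh.symm
    simp [pvSplit, hc, ih _ h.2]

theorem pvSplit_append (pre xs ys) :
    pvSplit pre (xs ++ '.' :: ys) = pvSplit pre xs ++ pvSplit [] ys := by
  induction xs generalizing pre with
  | nil => simp [pvSplit]
  | cons c rest ih =>
    by_cases hc : c = '.' <;> simp [pvSplit, hc, ih]

theorem pvSplit_foldl (l : List Char) : ∀ (pre init : List Char),
    (pvSplit pre l).foldl (fun acc i => acc ++ i ++ ['.']) init = init ++ pre ++ l ++ ['.'] := by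
  induction l with
  | nil => intro pre init; simp [pvSplit]
  | cons c rest ih =>
    intro pre init
    by_cases hc : c = '.'
    · rw [pvSplit, if_pos hc, List.foldl_cons, ih []]
      subst hc; simp
    · rw [pvSplit, if_neg hc, ih (pre ++ [c]) init]
      simp

theorem pvLastDot (l : List Char) (h : '.' ∈ l) :
    ∃ p s, l = p ++ '.' :: s ∧ '.' ∉ s := by
  induction l with
  | nil => simp at h
  | cons c rest ih =>
    by_cases hr : '.' ∈ rest
    · obtain ⟨p, s, hps, hs⟩ := ih hr
      exact ⟨c :: p, s, by simp [hps], hs⟩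
    · have hc : c = '.' := by
        rcases List.mem_cons.mp h with h | h
        · exact h.symm
        · exact absurd h hr
      exact ⟨[], rest, by simp [hc], hr⟩

theorem pvGet_neg1 {α : Type} (l : List α) (a : α) :
    PySem.List.pyGet? (l ++ [a]) (-1) = some a := by
  simp only [PySem.List.pyGet?, PySem.List.pyIdx?, List.length_append, List.length_cons]
  rw [if_neg (by omega), if_pos (by push_cast; omega)]
  simp

theorem pvGet_neg2 {α : Type} (l : List α) (a b : α) :
    PySem.List.pyGet? (l ++ [a, b]) (-2) = some a := by
  simp only [PySem.List.pyGet?, PySem.List.pyIdx?, List.length_append, List.length_cons]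
  rw [if_neg (by omega), if_pos (by push_cast; omega)]
  simp

theorem pvGet_neg3 {α : Type} (l : List α) (x a b : α) :
    PySem.List.pyGet? (l ++ [x, a, b]) (-3) = some x := by
  simp only [PySem.List.pyGet?, PySem.List.pyIdx?, List.length_append, List.length_cons]
  rw [if_neg (by omega), if_pos (by push_cast; omega)]
  simp

theorem pvSlice_neg2 {α : Type} (l : List α) (a b : α) :
    PySem.List.slice (l ++ [a, b]) none (some (-2)) = l := by
  simp only [PySem.List.slice, PySem.List.clampIdx, List.length_append, List.length_cons]
  rw [if_pos (by omega), if_neg (by push_cast; omega)]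
  simp

theorem pvSlice_neg1 {α : Type} (l : List α) (a : α) :
    PySem.List.slice (l ++ [a]) none (some (-1)) = l := by
  simp only [PySem.List.slice, PySem.List.clampIdx, List.length_append, List.length_cons]
  rw [if_pos (by omega), if_neg (by push_cast; omega)]
  simp

theorem pvDots_nil (s : Int) : pvDots [] s = [] := rfl

theorem pvDots_cons (c cs s) :
    pvDots (c :: cs) s = (if c = '.' then [s] else []) ++ pvDots cs (s + 1) := by
  by_cases hc : c = '.' <;>
    simp [pvDots, PySem.List.enumerate_cons, hc]

theorem pvDots_append (xs ys : List Char) (s : Int) :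
    pvDots (xs ++ ys) s = pvDots xs s ++ pvDots ys (s + xs.length) := by
  induction xs generalizing s with
  | nil => simp [pvDots_nil]
  | cons c rest ih =>
    rw [List.cons_append, pvDots_cons, pvDots_cons, ih]
    simp only [List.length_cons, List.append_assoc]
    push_cast
    ring_nf

theorem pvDots_no_dot (l : List Char) (s : Int) (h : '.' ∉ l) : pvDots l s = [] := by
  induction l generalizing s with
  | nil => rfl
  | cons c rest ih =>
    simp only [List.mem_cons, not_or] at h
    rw [pvDots_cons]
    simp [Ne.symm h.1 , ih _ h.2]

theorem pvDots_length (l : List Char) (s : Int) : (pvDots l s).length = l.count '.' := by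
  induction l generalizing s with
  | nil => rfl
  | cons c rest ih =>
    rw [pvDots_cons]
    by_cases hc : c = '.' <;> simp [hc, ih]

theorem pvValidAB_eq_all (l : List Char) : pvValidSectionAB l = l.all pvValid1.contains := by
  induction l with
  | nil => rfl
  | cons c rest ih =>
    by_cases hc : pvValid1.contains c <;> simp [pvValidSectionAB, hc, ih]

theorem pvValidCLoop_eq_all (l : List Char) : pvValidCLoop l = l.all pvValid2.contains := by
  induction l with
  | nil => rfl
  | cons c rest ih =>
    by_cases hc : pvValid2.contains c <;> simp [pvValidCLoop, hc, ih]

theorem pvValid2_eq : pvValid2 = pvValid1 ++ ['.'] := by decide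

theorem pvGet_zero {α : Type} (l : List α) : PySem.List.pyGet? l 0 = l.head? := by
  cases l <;> simp [PySem.List.pyGet?, PySem.List.pyIdx?]

theorem pvGet_last {α : Type} (l : List α) (h : l ≠ []) :
    PySem.List.pyGet? l (-1) = l.getLast? := by
  obtain ⟨L, b, rfl⟩ := (List.eq_nil_or_concat' l).resolve_left h
  rw [pvGet_neg1]
  simp

set_option maxHeartbeats 1000000 in
theorem pvAllowed_eq : pvAllowed = pvValid2 := by decide

theorem pvAll12 (l : List Char) (h : '.' ∉ l) :
    l.all pvValid2.contains = l.all pvValid1.contains := by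
  induction l with
  | nil => simp
  | cons c rest ih =>
    simp only [List.mem_cons, not_or] at h
    have hc : pvValid2.contains c = pvValid1.contains c := by
      rw [pvValid2_eq]
      simp only [List.contains_append, List.contains_cons, List.contains_nil,
        Bool.or_false]
      have : (c == '.') = false := by
        simp only [beq_eq_false_iff_ne, ne_eq]
        exact fun hh => h.1 hh.symm
      simp [this]
    simp only [List.all_cons]
    rw [hc, ih h.2]

-- A's body on the character list (definitionally equal to the port)
def pvA (cs : List Char) : Bool :=
  let parts := PySem.Chars.splitOn cs ['.']
  if 3 ≤ parts.length then
    let section_a := (PySem.List.pyGet? parts (-1)).getD []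
    let section_b := (PySem.List.pyGet? parts (-2)).getD []
    let section_c_list := PySem.List.slice parts none (some (-2))
    let built := section_c_list.foldl (fun acc i => acc ++ i ++ ['.']) []
    let section_c := PySem.List.slice built none (some (-1))
    if section_a = [] ∨ section_b = [] ∨ section_c = [] then false
    else
      let value_a := pvValidSectionAB section_a
      let value_b := pvValidSectionAB section_b
      let value_c := pvValidSectionC section_c
      value_a && value_b && value_c
  else false

theorem pvA_eq (host : String) : is_valid_hostname_master host = pvA host.toList := rfl

-- B's body on the character list (definitionally equal to the port; pvDots unfolds
-- to the filterMap/enumerate comprehension)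
def pvB (cs : List Char) : Bool :=
  if cs.all (fun ch => pvAllowed.contains ch) then
    let dots := pvDots cs 0
    if dots.length < 2 then false
    else
      let d1 := (PySem.List.pyGet? dots (-2)).getD 0
      let d2 := (PySem.List.pyGet? dots (-1)).getD 0
      let d0 := if 3 ≤ dots.length then (PySem.List.pyGet? dots (-3)).getD 0 else -1
      decide (PySem.List.pyGet? cs 0 ≠ some '.') &&
        decide (d2 ≠ (cs.length : Int) - 1) &&
        decide (1 < d2 - d1) && decide (1 < d1 - d0)
  else false

theorem pvB_eq (host : String) : is_valid_hostname_master_alt host = pvB host.toList := rfl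

-- the common shape both programs reduce to on cs = u ++ '.' :: (v ++ '.' :: w)
def pvE (u v w : List Char) : Bool :=
  if w = [] ∨ v = [] ∨ u = [] then false
  else
    pvValidSectionAB w && pvValidSectionAB v &&
      (if u.head? = some '.' ∨ u.getLast? = some '.' then false else pvValidCLoop u)

theorem pvA_split (u v w : List Char) (hv : '.' ∉ v) (hw : '.' ∉ w) :
    pvA (u ++ '.' :: (v ++ '.' :: w)) = pvE u v w := by
  have hparts : PySem.Chars.splitOn (u ++ '.' :: (v ++ '.' :: w)) ['.']
      = pvSplit [] u ++ [v, w] := by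
    rw [pvSplitOn_eq, pvSplit_append, pvSplit_append,
      pvSplit_no_dot [] v hv, pvSplit_no_dot [] w hw]
    simp
  have hlen : 3 ≤ (pvSplit [] u ++ [v, w]).length := by
    simp [pvSplit_length]
  have hsa : (PySem.List.pyGet? (pvSplit [] u ++ [v, w]) (-1)).getD [] = w := by
    rw [show pvSplit [] u ++ [v, w] = (pvSplit [] u ++ [v]) ++ [w] by simp, pvGet_neg1]
    rfl
  have hsb : (PySem.List.pyGet? (pvSplit [] u ++ [v, w]) (-2)).getD [] = v := by
    rw [pvGet_neg2]; rfl
  have hsc : PySem.List.slice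
      ((PySem.List.slice (pvSplit [] u ++ [v, w]) none (some (-2))).foldl
        (fun acc i => acc ++ i ++ ['.']) []) none (some (-1)) = u := by
    rw [pvSlice_neg2, pvSplit_foldl]
    simpa using pvSlice_neg1 u '.'
  simp only [pvA, hparts, hsa, hsb, hsc, if_pos hlen, pvE]
  by_cases hu : u = []
  · simp [hu]
  · rw [pvValidSectionC, pvGet_zero, pvGet_last u hu]
    have ha : u.head? = some (u.head hu) := List.head?_eq_some_head hu
    have hb : u.getLast? = some (u.getLast hu) := List.getLast?_eq_some_getLast hu
    set a := u.head hu with hadef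
    set b := u.getLast hu with hbdef
    rw [ha, hb]
    by_cases hab : a = '.' ∨ b = '.'
    · have : u.head? = some '.' ∨ u.getLast? = some '.' := by
        rcases hab with h | h
        · exact Or.inl (h ▸ ha)
        · exact Or.inr (h ▸ hb)
      simp [hu, hab, this]
    · have h2 : ¬ (u.head? = some '.' ∨ u.getLast? = some '.') := by
        rw [ha, hb]
        simpa using hab
      simp [hu, hab, h2]

theorem pvB_split (u v w : List Char) (hv : '.' ∉ v) (hw : '.' ∉ w) :
    pvB (u ++ '.' :: (v ++ '.' :: w)) = pvE u v w := by
  have hall : ((u ++ '.' :: (v ++ '.' :: w)).all fun ch => pvAllowed.contains ch)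
      = (u.all pvValid2.contains && (v.all pvValid1.contains && w.all pvValid1.contains)) := by
    rw [show (fun ch => pvAllowed.contains ch) = fun ch => pvValid2.contains ch from by
      rw [pvAllowed_eq]]
    rw [List.all_append, List.all_cons, List.all_append, List.all_cons]
    rw [show pvValid2.contains '.' = true from by decide]
    rw [pvAll12 v hv, pvAll12 w hw]
    simp only [Bool.true_and]
  have hdots : pvDots (u ++ '.' :: (v ++ '.' :: w)) 0
      = pvDots u 0 ++ [(u.length : Int), (u.length : Int) + 1 + (v.length : Int)] := by
    rw [pvDots_append, pvDots_cons, pvDots_append, pvDots_no_dot v _ hv,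
        pvDots_cons, pvDots_no_dot w _ hw]
    simp
  simp only [pvB, hdots, hall]
  rw [pvGet_zero]
  have hlen2 : ¬ ((pvDots u 0 ++ [(u.length : Int), (u.length : Int) + 1 + (v.length : Int)]).length < 2) := by
    simp
  rw [if_neg hlen2]
  have hd2 : (PySem.List.pyGet? (pvDots u 0 ++ [(u.length : Int), (u.length : Int) + 1 + (v.length : Int)]) (-1)).getD 0
      = (u.length : Int) + 1 + (v.length : Int) := by
    rw [show pvDots u 0 ++ [(u.length : Int), (u.length : Int) + 1 + (v.length : Int)]
        = (pvDots u 0 ++ [(u.length : Int)]) ++ [(u.length : Int) + 1 + (v.length : Int)] by simp,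
      pvGet_neg1]
    rfl
  have hd1 : (PySem.List.pyGet? (pvDots u 0 ++ [(u.length : Int), (u.length : Int) + 1 + (v.length : Int)]) (-2)).getD 0
      = (u.length : Int) := by
    rw [pvGet_neg2]
    rfl
  rw [hd2, hd1]
  have hlencs : (((u ++ '.' :: (v ++ '.' :: w)).length : Int))
      = (u.length : Int) + 1 + (v.length : Int) + 1 + (w.length : Int) := by
    simp only [List.length_append, List.length_cons]
    push_cast
    ring
  have hc1 : ((u.length : Int) + 1 + (v.length : Int) ≠ ((u ++ '.' :: (v ++ '.' :: w)).length : Int) - 1) ↔ w ≠ [] := by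
    rw [hlencs]
    constructor
    · intro h h0
      rw [h0] at h
      simp at h
    · intro h0 heq
      exact h0 (List.length_eq_zero_iff.mp (by omega))
  have hc2 : (1 < ((u.length : Int) + 1 + (v.length : Int)) - (u.length : Int)) ↔ v ≠ [] := by
    constructor
    · intro h h0
      rw [h0] at h
      simp at h
    · intro h0
      have : v.length ≠ 0 := fun hh => h0 (List.length_eq_zero_iff.mp hh)
      omega
  simp only [hc1, hc2]
  by_cases hu0 : u = []
  · subst hu0
    simp [pvE, pvDots_nil]
  · -- u nonempty: the head of the whole string is the head of u
    have hhead : (u ++ '.' :: (v ++ '.' :: w)).head? = u.head? := by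
      rw [List.head?_append]
      rw [List.head?_eq_some_head hu0]
      rfl
    have ha : u.head? = some (u.head hu0) := List.head?_eq_some_head hu0
    have hane : u.head hu0 ≠ '.' → (¬ (u ++ '.' :: (v ++ '.' :: w)).head? = some '.') := by
      intro h
      rw [hhead, ha]
      simpa using h
    by_cases hud : '.' ∈ u
    · obtain ⟨p, s, hps, hsnd⟩ := pvLastDot u hud
      subst hps
      have hdp : pvDots (p ++ '.' :: s) 0 = pvDots p 0 ++ [(p.length : Int)] := by
        rw [pvDots_append, pvDots_cons, pvDots_no_dot s _ hsnd]
        simp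
      have hlen3 : 3 ≤ ((pvDots (p ++ '.' :: s) 0 ++ [((p ++ '.' :: s).length : Int), ((p ++ '.' :: s).length : Int) + 1 + (v.length : Int)]).length) := by
        simp [hdp]
      have hd0 : (PySem.List.pyGet? (pvDots (p ++ '.' :: s) 0 ++ [((p ++ '.' :: s).length : Int), ((p ++ '.' :: s).length : Int) + 1 + (v.length : Int)]) (-3)).getD 0
          = (p.length : Int) := by
        rw [hdp, show pvDots p 0 ++ [(p.length : Int)] ++ [((p ++ '.' :: s).length : Int), ((p ++ '.' :: s).length : Int) + 1 + (v.length : Int)]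
            = pvDots p 0 ++ [(p.length : Int), ((p ++ '.' :: s).length : Int), ((p ++ '.' :: s).length : Int) + 1 + (v.length : Int)] by simp,
          pvGet_neg3]
        rfl
      rw [if_pos hlen3, hd0]
      have hc3 : (1 < ((p ++ '.' :: s).length : Int) - (p.length : Int)) ↔ s ≠ [] := by
        simp only [List.length_append, List.length_cons]
        constructor
        · intro h h0
          subst h0
          simp at h
        · intro h0
          have : s.length ≠ 0 := fun hh => h0 (List.length_eq_zero_iff.mp hh)
          push_cast
          omega
      simp only [hc3]
      rcases s with _ | ⟨c, s'⟩
      · -- section_c ends in a dot: both sides false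
        have hlast : (p ++ ['.']).getLast? = some '.' := by
          simp
        simp [pvE, hlast]
      · have hlast : (p ++ '.' :: c :: s').getLast? = ((c :: s').getLast?) := by
          rw [List.getLast?_append]
          rfl
        have hlv : (c :: s').getLast? = some ((c :: s').getLast (by simp)) :=
          List.getLast?_eq_some_getLast (by simp)
        have hlne : (c :: s').getLast (by simp) ≠ '.' := by
          intro hh
          exact hsnd (hh ▸ List.getLast_mem (l := c :: s') (by simp))
        have hpg : p.head?.getD '.' = (p ++ '.' :: c :: s').head hu0 := by
          cases p <;> rfl
        have hlgd : ¬ s'.getLast?.getD c = '.' := by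
          rcases List.eq_nil_or_concat' s' with rfl | ⟨L, b, rfl⟩
          · intro hh
            simp only [List.getLast?_nil, Option.getD_none] at hh
            exact hsnd (by rw [hh]; exact List.mem_cons_self)
          · intro hh
            simp only [List.getLast?_concat, Option.getD_some] at hh
            exact hsnd (by rw [hh] at *; simp)
        by_cases hx : (p ++ '.' :: c :: s').head hu0 = '.'
        · -- section_c starts with a dot: both sides false
          have hdot : p.head?.getD '.' = '.' := hpg.trans hx
          simp [pvE, hdot]
        · have hndot : ¬ p.head?.getD '.' = '.' := fun hh => hx (hpg.symm.trans hh)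
          have h1 := hane hx
          have h2 : ¬ ((p ++ '.' :: c :: s').head? = some '.' ∨ (p ++ '.' :: c :: s').getLast? = some '.') := by
            rw [ha, hlast, hlv]
            push_neg
            constructor
            · simpa using hx
            · simpa using hlne
          by_cases hw0 : w = [] <;> by_cases hv0 : v = [] <;>
            [skip; skip; skip;
             (cases hA2u : (p ++ '.' :: c :: s').all pvValid2.contains <;>
              cases hA1v : v.all pvValid1.contains <;>
              cases hA1w : w.all pvValid1.contains)] <;>
            simp [pvE, pvValidAB_eq_all, pvValidCLoop_eq_all, h1, h2, hndot, hlgd, hw0, hv0, hu0, *]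
    · -- no dot inside section_c
      have hdp : pvDots u 0 = [] := pvDots_no_dot u 0 hud
      have hlen3 : ¬ 3 ≤ ((pvDots u 0 ++ [(u.length : Int), (u.length : Int) + 1 + (v.length : Int)]).length) := by
        simp [hdp]
      rw [if_neg hlen3]
      have hc3 : (1 < (u.length : Int) - (-1)) ↔ True := by
        simp only [iff_true]
        have : u.length ≠ 0 := fun hh => hu0 (List.length_eq_zero_iff.mp hh)
        omega
      simp only [hc3, decide_true, Bool.and_true]
      have hx : u.head hu0 ≠ '.' := by
        intro hh
        exact hud (hh ▸ List.head_mem hu0)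
      have hug : ¬ u.head?.getD '.' = '.' := by
        rw [ha]
        simpa using hx
      have h1 := hane hx
      have hlv : u.getLast? = some (u.getLast hu0) := List.getLast?_eq_some_getLast hu0
      have hlne : u.getLast hu0 ≠ '.' := by
        intro hh
        exact hud (hh ▸ List.getLast_mem hu0)
      have h2 : ¬ (u.head? = some '.' ∨ u.getLast? = some '.') := by
        rw [ha, hlv]
        push_neg
        constructor
        · simpa using hx
        · simpa using hlne
      by_cases hw0 : w = [] <;> by_cases hv0 : v = [] <;>
        [skip; skip; skip;
         (cases hA2u : u.all pvValid2.contains <;>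
          cases hA1v : v.all pvValid1.contains <;>
          cases hA1w : w.all pvValid1.contains)] <;>
        simp [pvE, pvValidAB_eq_all, pvValidCLoop_eq_all, h1, h2, hug, hw0, hv0, hu0, *]

theorem pv_main (host : String) :
    is_valid_hostname_master host = is_valid_hostname_master_alt host := by
  rw [pvA_eq, pvB_eq]
  rcases Nat.lt_or_ge (host.toList.count '.') 2 with hlt | hge
  · -- fewer than two dots: both sides are false
    have hA : pvA host.toList = false := by
      simp only [pvA, pvSplitOn_eq]
      rw [if_neg]
      rw [pvSplit_length]
      omega
    have hB : pvB host.toList = false := by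
      by_cases hall : host.toList.all (fun ch => pvAllowed.contains ch)
      · simp only [pvB, if_pos hall]
        rw [if_pos]
        rw [pvDots_length]
        omega
      · simp only [pvB]
        rw [if_neg hall]
    rw [hA, hB]
  · -- at least two dots: decompose at the last two dots
    have hmem : '.' ∈ host.toList := List.count_pos_iff.mp (by omega)
    obtain ⟨r, w, hr, hwnd⟩ := pvLastDot _ hmem
    have hrcount : r.count '.' + 1 = host.toList.count '.' := by
      rw [hr]
      simp [List.count_append, List.count_eq_zero_of_not_mem hwnd]
    have hrmem : '.' ∈ r := List.count_pos_iff.mp (by omega)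
    obtain ⟨u, v, hu, hvnd⟩ := pvLastDot _ hrmem
    have hcs : host.toList = u ++ '.' :: (v ++ '.' :: w) := by
      rw [hr, hu]
      simp
    rw [hcs, pvA_split u v w hvnd hwnd, pvB_split u v w hvnd hwnd]
-- ===== VERDICT (by name: the statement is the Claim_ definition above) =====
theorem is_valid_hostname_master_spec : Claim_equal_is_valid_hostname_master := by
  intro host _
  exact pv_main host
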